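-- pv_equiv track=rewrite | github.com/SulmanK/BeatDebate | src/agents/genre_mood/mood_logic.py | _apply_context_modifiers
-- ===== SOURCE A (Python) =====
-- from typing import Dict, List, Any, Tuple
--
-- def _apply_context_modifiers(
--
--     detected_moods: List[str],
--     context_factors: List[str]
-- ) -> List[str]:
--     """Apply context-based mood modifiers."""
--     modifiers = []
--
--     for context in context_factors:
--         context_lower = context.lower()
--
--         # Activity-based modifiers
--         if 'workout' in context_lower or 'exercise' in context_lower:
--             modifiers.extend(['motivational', 'energizing', 'pumping'])
--         elif 'work' in context_lower or 'study' in context_lower: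
--             modifiers.extend(['focused', 'productive', 'concentration'])
--         elif 'party' in context_lower or 'social' in context_lower:
--             modifiers.extend(['social', 'upbeat', 'danceable'])
--         elif 'drive' in context_lower or 'travel' in context_lower:
--             modifiers.extend(['driving', 'journey', 'road'])
--         elif 'sleep' in context_lower or 'bedtime' in context_lower:
--             modifiers.extend(['sleepy', 'dreamy', 'peaceful'])
--
--     return list(set(modifiers))  # Remove duplicates
-- ===== SOURCE B (Python) =====
-- KEYWORD_RULE = {
--     "workout": 0, "exercise": 0,
--     "work": 1, "study": 1,
--     "party": 2, "social": 2,
--     "drive": 3, "travel": 3,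
--     "sleep": 4, "bedtime": 4,
-- }
-- MODS = [
--     ["motivational", "energizing", "pumping"],
--     ["focused", "productive", "concentration"],
--     ["social", "upbeat", "danceable"],
--     ["driving", "journey", "road"],
--     ["sleepy", "dreamy", "peaceful"],
-- ]
--
--
-- def _apply_context_modifiers(detected_moods, context_factors):
--     """Staged: classify each context to the lowest-priority-index rule whose
--     keyword occurs, dedupe the rule indices, then flatten their modifier lists."""
--     hits = []
--     for context in context_factors:
--         cl = context.lower()
--         matches = [r for k, r in KEYWORD_RULE.items() if k in cl]
--         if matches:
--             hits.append(min(matches))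
--     order = []
--     for i in hits:
--         if i not in order:
--             order.append(i)
--     mods = [m for i in order for m in MODS[i]]
--     return list(set(mods))
-- ===== Notes on version B (the rewrite author's own statement) =====
-- stated objective: alternative
-- what changed: Replaces the per-context if/elif chain that appends modifier triples with a staged pipeline: classify each context to the minimal rule index matched via a keyword-to-rule map (min over all matching keywords replaces ordered branch priority), dedupe at the rule-index level, then flatten the modifier lists once at the end.
import Mathlib
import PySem

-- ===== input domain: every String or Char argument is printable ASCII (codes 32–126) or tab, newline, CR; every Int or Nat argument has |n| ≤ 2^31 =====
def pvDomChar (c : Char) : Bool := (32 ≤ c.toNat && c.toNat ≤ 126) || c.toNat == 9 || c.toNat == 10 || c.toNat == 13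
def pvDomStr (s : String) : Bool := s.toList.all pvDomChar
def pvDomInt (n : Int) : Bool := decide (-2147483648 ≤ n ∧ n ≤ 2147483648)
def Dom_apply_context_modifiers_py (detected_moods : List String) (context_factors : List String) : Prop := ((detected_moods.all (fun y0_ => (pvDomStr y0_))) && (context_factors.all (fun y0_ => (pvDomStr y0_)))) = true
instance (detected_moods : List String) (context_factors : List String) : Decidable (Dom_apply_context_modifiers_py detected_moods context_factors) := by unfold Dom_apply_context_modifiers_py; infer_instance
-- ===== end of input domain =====

-- B replaces the per-context if/elif chain by staged passes: classify each context to the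
-- minimal matching rule index via a keyword→rule map, dedupe the indices, then flatten the
-- modifier lists (objective: alternative decomposition).  Python's list(set(...)) hash order
-- is not modelled: both ports return the distinct elements in first-occurrence order.

-- ===== PORT A =====
def apply_context_modifiers_py (detected_moods : List String) (context_factors : List String) : List String :=
  let modifiers : List String :=
    context_factors.foldl (fun modifiers context =>
      let context_lower := PySem.Str.lower context
      if PySem.Str.isIn "workout" context_lower || PySem.Str.isIn "exercise" context_lower then
        modifiers ++ ["motivational", "energizing", "pumping"]
      else if PySem.Str.isIn "work" context_lower || PySem.Str.isIn "study" context_lower then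
        modifiers ++ ["focused", "productive", "concentration"]
      else if PySem.Str.isIn "party" context_lower || PySem.Str.isIn "social" context_lower then
        modifiers ++ ["social", "upbeat", "danceable"]
      else if PySem.Str.isIn "drive" context_lower || PySem.Str.isIn "travel" context_lower then
        modifiers ++ ["driving", "journey", "road"]
      else if PySem.Str.isIn "sleep" context_lower || PySem.Str.isIn "bedtime" context_lower then
        modifiers ++ ["sleepy", "dreamy", "peaceful"]
      else modifiers) []
  PySem.Set.ofList modifiers

-- ===== PORT B =====
def pvKeywordRule : List (String × Nat) :=
  [("workout", 0), ("exercise", 0),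
   ("work", 1), ("study", 1),
   ("party", 2), ("social", 2),
   ("drive", 3), ("travel", 3),
   ("sleep", 4), ("bedtime", 4)]

def pvMods : List (List String) :=
  [["motivational", "energizing", "pumping"],
   ["focused", "productive", "concentration"],
   ["social", "upbeat", "danceable"],
   ["driving", "journey", "road"],
   ["sleepy", "dreamy", "peaceful"]]

-- matches = [r for k, r in KEYWORD_RULE.items() if k in cl]; min(matches) if matches else None
def pvClassify (cl : String) : Option Nat :=
  (pvKeywordRule.filterMap (fun p => if PySem.Str.isIn p.1 cl then some p.2 else none)).min?

def apply_context_modifiers_py_alt (detected_moods : List String) (context_factors : List String) : List String :=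
  let hits := context_factors.filterMap (fun context => pvClassify (PySem.Str.lower context))
  let order := PySem.Set.ofList hits
  let mods := order.flatMap (fun i => pvMods.getD i [])
  PySem.Set.ofList mods

-- ===== PRECONDITION & SPEC =====
def Spec_apply_context_modifiers_py (detected_moods : List String) (context_factors : List String) (out : List String) : Prop := out = apply_context_modifiers_py_alt detected_moods context_factors
instance (detected_moods : List String) (context_factors : List String) (out : List String) : Decidable (Spec_apply_context_modifiers_py detected_moods context_factors out) := by unfold Spec_apply_context_modifiers_py; infer_instance

-- ===== CLAIM (what is proved, stated in full; the proofs are below) =====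
def Claim_equal_apply_context_modifiers_py : Prop := ∀ (detected_moods : List String) (context_factors : List String), Dom_apply_context_modifiers_py detected_moods context_factors → Spec_apply_context_modifiers_py detected_moods context_factors (apply_context_modifiers_py detected_moods context_factors)

-- ===== LEMMAS AND PROOFS =====

-- M i = the modifier triple of rule i (empty outside 0..4)
def pvM (i : Nat) : List String := pvMods.getD i []

-- The classification, abstracted over the ten keyword-occurrence booleans.
def pvSel (b0 b1 b2 b3 b4 b5 b6 b7 b8 b9 : Bool) : Option Nat :=
  (List.filterMap (fun p : Bool × Nat => if p.1 then some p.2 else none)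
    [(b0, 0), (b1, 0), (b2, 1), (b3, 1), (b4, 2), (b5, 2), (b6, 3), (b7, 3), (b8, 4), (b9, 4)]).min?

lemma pvChain_eq_sel (b0 b1 b2 b3 b4 b5 b6 b7 b8 b9 : Bool) :
    (if b0 || b1 then ["motivational", "energizing", "pumping"]
     else if b2 || b3 then ["focused", "productive", "concentration"]
     else if b4 || b5 then ["social", "upbeat", "danceable"]
     else if b6 || b7 then ["driving", "journey", "road"]
     else if b8 || b9 then ["sleepy", "dreamy", "peaceful"]
     else [])
    = (pvSel b0 b1 b2 b3 b4 b5 b6 b7 b8 b9).elim [] pvM := by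
  cases b0 <;> cases b1 <;> cases b2 <;> cases b3 <;> cases b4 <;>
    cases b5 <;> cases b6 <;> cases b7 <;> cases b8 <;> cases b9 <;> rfl

-- A's per-context branch appends exactly the modifiers of the classified rule.
lemma stepA_eq_append (modifiers : List String) (cl : String) :
    (if PySem.Str.isIn "workout" cl || PySem.Str.isIn "exercise" cl then
        modifiers ++ ["motivational", "energizing", "pumping"]
      else if PySem.Str.isIn "work" cl || PySem.Str.isIn "study" cl then
        modifiers ++ ["focused", "productive", "concentration"]
      else if PySem.Str.isIn "party" cl || PySem.Str.isIn "social" cl then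
        modifiers ++ ["social", "upbeat", "danceable"]
      else if PySem.Str.isIn "drive" cl || PySem.Str.isIn "travel" cl then
        modifiers ++ ["driving", "journey", "road"]
      else if PySem.Str.isIn "sleep" cl || PySem.Str.isIn "bedtime" cl then
        modifiers ++ ["sleepy", "dreamy", "peaceful"]
      else modifiers)
    = modifiers ++ (pvClassify cl).elim [] pvM := by
  have h : pvClassify cl = pvSel (PySem.Str.isIn "workout" cl) (PySem.Str.isIn "exercise" cl)
      (PySem.Str.isIn "work" cl) (PySem.Str.isIn "study" cl)
      (PySem.Str.isIn "party" cl) (PySem.Str.isIn "social" cl)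
      (PySem.Str.isIn "drive" cl) (PySem.Str.isIn "travel" cl)
      (PySem.Str.isIn "sleep" cl) (PySem.Str.isIn "bedtime" cl) := rfl
  rw [h, ← pvChain_eq_sel]
  split_ifs <;> simp

-- A's whole fold is the flatMap of the classified modifier lists.
lemma foldA_eq_flatMap (cf : List String) : ∀ acc : List String,
    cf.foldl (fun modifiers context =>
      let context_lower := PySem.Str.lower context
      if PySem.Str.isIn "workout" context_lower || PySem.Str.isIn "exercise" context_lower then
        modifiers ++ ["motivational", "energizing", "pumping"]
      else if PySem.Str.isIn "work" context_lower || PySem.Str.isIn "study" context_lower then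
        modifiers ++ ["focused", "productive", "concentration"]
      else if PySem.Str.isIn "party" context_lower || PySem.Str.isIn "social" context_lower then
        modifiers ++ ["social", "upbeat", "danceable"]
      else if PySem.Str.isIn "drive" context_lower || PySem.Str.isIn "travel" context_lower then
        modifiers ++ ["driving", "journey", "road"]
      else if PySem.Str.isIn "sleep" context_lower || PySem.Str.isIn "bedtime" context_lower then
        modifiers ++ ["sleepy", "dreamy", "peaceful"]
      else modifiers) acc
    = acc ++ cf.flatMap (fun c => (pvClassify (PySem.Str.lower c)).elim [] pvM) := by
  induction cf with
  | nil => intro acc; simp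
  | cons c cs ih =>
    intro acc
    simp only [List.foldl_cons, List.flatMap_cons]
    rw [stepA_eq_append acc (PySem.Str.lower c), ih, List.append_assoc]

-- flatMap of the optional triples = flatMap of pvM over the filterMapped hits.
lemma flatMap_elim_eq_filterMap (cf : List String) :
    cf.flatMap (fun c => (pvClassify (PySem.Str.lower c)).elim [] pvM)
    = (cf.filterMap (fun c => pvClassify (PySem.Str.lower c))).flatMap pvM := by
  induction cf with
  | nil => rfl
  | cons c cs ih =>
    simp only [List.flatMap_cons, List.filterMap_cons]
    cases h : pvClassify (PySem.Str.lower c) <;> simp [ih]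

lemma pvClassify_lt (cl : String) : ∀ i, pvClassify cl = some i → i < 5 := by
  intro i h
  have h5 : ∀ b0 b1 b2 b3 b4 b5 b6 b7 b8 b9 : Bool, ∀ j,
      pvSel b0 b1 b2 b3 b4 b5 b6 b7 b8 b9 = some j → j < 5 := by decide
  exact h5 (PySem.Str.isIn "workout" cl) (PySem.Str.isIn "exercise" cl)
      (PySem.Str.isIn "work" cl) (PySem.Str.isIn "study" cl)
      (PySem.Str.isIn "party" cl) (PySem.Str.isIn "social" cl)
      (PySem.Str.isIn "drive" cl) (PySem.Str.isIn "travel" cl)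
      (PySem.Str.isIn "sleep" cl) (PySem.Str.isIn "bedtime" cl) i h

lemma pvM_nodup : ∀ a, a < 5 → (pvM a).Nodup := by decide

lemma pvM_disjoint (a i : Nat) (ha : a < 5) (hi : i < 5) (hne : a ≠ i) :
    ∀ m ∈ pvM a, m ∉ pvM i := by
  interval_cases a <;> interval_cases i <;> first | exact absurd rfl hne | decide

-- update by a subset changes nothing
lemma update_of_subset (s xs : List String) (h : ∀ x ∈ xs, x ∈ s) :
    PySem.Set.update s xs = s := by
  rw [PySem.Set.update_eq_append_filter]
  have hnil : (PySem.Set.ofList xs).filter (fun y => !(PySem.Set.contains s y)) = [] := by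
    apply List.filter_eq_nil_iff.mpr
    intro y hy
    have hy' : y ∈ xs := (PySem.Set.mem_ofList xs y).mp hy
    simpa using h y hy'
  rw [hnil, List.append_nil]

-- KEY LEMMA: deduplicating the flattened modifiers equals flattening the deduplicated indices.
lemma ofList_flatMap (l : List Nat) (hl : ∀ i ∈ l, i < 5) :
    PySem.Set.ofList (l.flatMap pvM) = (PySem.Set.ofList l).flatMap pvM := by
  induction l using List.reverseRecOn with
  | nil => rfl
  | append_singleton t a ih =>
    have ht : ∀ i ∈ t, i < 5 := fun i hi => hl i (by simp [hi])
    have ha : a < 5 := hl a (by simp)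
    rw [List.flatMap_append, PySem.Set.ofList_append, ih ht,
        PySem.Set.ofList_append_singleton]
    by_cases hmem : a ∈ PySem.Set.ofList t
    · rw [PySem.Set.add_of_mem hmem]
      simp only [List.flatMap_singleton]
      apply update_of_subset
      intro x hx
      exact List.mem_flatMap.mpr ⟨a, hmem, hx⟩
    · rw [PySem.Set.add_of_not_mem hmem]
      simp only [List.flatMap_singleton]
      have hdisj : ∀ x ∈ pvM a, x ∉ List.flatMap pvM (PySem.Set.ofList t) := by
        intro x hx hx'
        rcases List.mem_flatMap.mp hx' with ⟨i, hi, hxi⟩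
        have hi5 : i < 5 := ht i ((PySem.Set.mem_ofList t i).mp hi)
        by_cases hia : a = i
        · exact hmem (hia ▸ hi)
        · exact pvM_disjoint a i ha hi5 hia x hx hxi
      rw [PySem.Set.update_eq_append_of_disjoint _ _ (pvM_nodup a ha) hdisj,
          List.flatMap_append, List.flatMap_singleton]

-- ===== VERDICT (by name: the statement is the Claim_ definition above) =====
theorem apply_context_modifiers_py_spec : Claim_equal_apply_context_modifiers_py := by
  intro dm cf _
  show apply_context_modifiers_py dm cf = apply_context_modifiers_py_alt dm cf
  unfold apply_context_modifiers_py apply_context_modifiers_py_alt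
  rw [foldA_eq_flatMap cf [], List.nil_append, flatMap_elim_eq_filterMap]
  have hpvM : (fun i => pvMods.getD i []) = pvM := rfl
  rw [hpvM]
  set hits := cf.filterMap (fun c => pvClassify (PySem.Str.lower c)) with hhits
  have hlt : ∀ i ∈ hits, i < 5 := by
    intro i hi
    rcases List.mem_filterMap.mp hi with ⟨c, _, hc⟩
    exact pvClassify_lt _ i hc
  have hlt' : ∀ i ∈ PySem.Set.ofList hits, i < 5 := fun i hi =>
    hlt i ((PySem.Set.mem_ofList hits i).mp hi)
  rw [ofList_flatMap hits hlt, ofList_flatMap (PySem.Set.ofList hits) hlt',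
      PySem.Set.ofList_ofList]
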